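-- pv_equiv track=rewrite | github.com/Shiakaron/foo.bar | level3_part3old.py | get_T_matrix
-- ===== SOURCE A (Python) =====
-- def get_T_matrix(n, sums, N):
--     """
--     """
--     T = []
--     for i in range(N):
--         temp = 1
--         for j in range(N):
--             if j!=i:
--                 temp *= sums[j]
--         copy = n[i][:]
--         for j in range(N):
--             copy[j] *= temp
--         T.append(copy)
--     return T
-- ===== SOURCE B (Python) =====
-- def get_T_matrix(n, sums, N):
--     prefixes = [1]
--     for j in range(N - 1):
--         prefixes.append(prefixes[-1] * sums[j])
--     suffixes = [1]
--     for j in reversed(range(1, N)):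
--         suffixes.append(suffixes[-1] * sums[j])
--     suffixes.reverse()
--     return [[x * (prefixes[i] * suffixes[i]) for x in n[i]] for i in range(N)]
-- ===== Notes on version B (the rewrite author's own statement) =====
-- stated objective: faster
-- what changed: Replaces the per-row O(N) inner product scan by prefix/suffix running-product tables built in two linear passes, so the product-of-other-row-sums is read off as prefixes[i]*suffixes[i] with no inner j!=i loop.
-- intended difference: On inputs with N >= 2 where some of the first N rows is longer than N, A leaves the entries beyond column N-1 unscaled (an artefact of its fixed range(N) scaling loop), while B scales the whole row, which is the intended value for 'scale each row by the product of the other row-sums'. — e.g. on get_T_matrix([[1, 2, 9], [3, 4]], [3, 7], 2): A returns [[7, 14, 9], [9, 12]], B returns [[7, 14, 63], [9, 12]]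
import Mathlib
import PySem

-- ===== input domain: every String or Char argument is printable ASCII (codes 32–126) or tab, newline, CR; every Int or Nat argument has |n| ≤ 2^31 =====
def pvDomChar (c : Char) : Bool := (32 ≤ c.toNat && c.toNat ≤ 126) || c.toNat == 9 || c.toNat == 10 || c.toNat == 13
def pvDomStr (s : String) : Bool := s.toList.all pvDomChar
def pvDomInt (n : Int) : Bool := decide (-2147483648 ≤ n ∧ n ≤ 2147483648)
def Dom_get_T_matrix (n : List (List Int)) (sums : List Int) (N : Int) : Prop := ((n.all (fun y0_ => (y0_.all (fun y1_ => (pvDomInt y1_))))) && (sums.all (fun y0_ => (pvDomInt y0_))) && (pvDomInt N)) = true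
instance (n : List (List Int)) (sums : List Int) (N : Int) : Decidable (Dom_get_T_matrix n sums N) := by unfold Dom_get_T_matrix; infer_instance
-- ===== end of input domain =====

-- B replaces A's per-row inner product scan (j != i) by prefix/suffix running-product tables built in two linear passes.


-- ===== PORT A =====
-- temp = 1; for j in range(N): if j != i: temp *= sums[j]
def pvTempA (sums : List Int) (N i : Int) : Int :=
  (PySem.List.pyRange 0 N 1).foldl
    (fun t j => if j ≠ i then t * PySem.List.pyGetD sums j 0 else t) 1

-- copy = n[i][:]; for j in range(N): copy[j] *= temp
def pvRowA (n : List (List Int)) (sums : List Int) (N i : Int) : List Int :=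
  (PySem.List.pyRange 0 N 1).foldl
    (fun c j => PySem.List.pySetD c j (PySem.List.pyGetD c j 0 * pvTempA sums N i))
    (PySem.List.pyGetD n i [])

def get_T_matrix (n : List (List Int)) (sums : List Int) (N : Int) : List (List Int) :=
  (PySem.List.pyRange 0 N 1).foldl (fun T i => T ++ [pvRowA n sums N i]) []

-- ===== PORT B =====
-- out = [1]; for j in idxs: out.append(out[-1] * sums[j])   (both of Source B's running-product loops)
def pvScanIdx (sums : List Int) (idxs : List Int) : List Int :=
  idxs.foldl
    (fun p j => p ++ [PySem.List.pyGetD p (-1) 1 * PySem.List.pyGetD sums j 0]) [1]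

-- prefixes: for j in range(N - 1)
def pvPrefB (sums : List Int) (N : Int) : List Int :=
  pvScanIdx sums (PySem.List.pyRange 0 (N - 1) 1)

-- suffixes: for j in reversed(range(1, N)), then suffixes.reverse()
def pvSuffB (sums : List Int) (N : Int) : List Int :=
  (pvScanIdx sums (PySem.List.pyRange 1 N 1).reverse).reverse

-- [[x * (prefixes[i] * suffixes[i]) for x in n[i]] for i in range(N)]
def get_T_matrix_alt (n : List (List Int)) (sums : List Int) (N : Int) : List (List Int) :=
  (PySem.List.pyRange 0 N 1).map (fun i =>
    (PySem.List.pyGetD n i []).map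
      (fun x => x * (PySem.List.pyGetD (pvPrefB sums N) i 0 *
                     PySem.List.pyGetD (pvSuffB sums N) i 0)))

-- ===== PRECONDITION & SPEC =====
-- Pre_ excludes exactly the inputs where A raises an IndexError: N rows are needed,
-- sums[j] is read for every j < N whenever N ≥ 2, and each of the first N rows needs N entries.
def Pre_get_T_matrix (n : List (List Int)) (sums : List Int) (N : Int) : Prop :=
  N ≤ (n.length : Int) ∧ (2 ≤ N → N ≤ (sums.length : Int)) ∧
  ∀ row ∈ n.take N.toNat, N ≤ (row.length : Int)
instance (n : List (List Int)) (sums : List Int) (N : Int) : Decidable (Pre_get_T_matrix n sums N) := by unfold Pre_get_T_matrix; infer_instance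
def pvWitness_get_T_matrix : List (List Int) × List Int × Int := ([[1, 2], [3, 4]], [3, 7], 2)

-- On inputs with N ≥ 2 where some of the first N rows is longer than N, A leaves the entries beyond
-- column N-1 unscaled (an artefact of its fixed range(N) scaling loop), while B scales the whole row,
-- which is the intended value for scaling each row by the product of the other row-sums.
def D_get_T_matrix (n : List (List Int)) (sums : List Int) (N : Int) : Prop :=
  2 ≤ N ∧ ∃ row ∈ n.take N.toNat, N < (row.length : Int)
instance (n : List (List Int)) (sums : List Int) (N : Int) : Decidable (D_get_T_matrix n sums N) := by unfold D_get_T_matrix; infer_instance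

def Spec_get_T_matrix (n : List (List Int)) (sums : List Int) (N : Int) (out : List (List Int)) : Prop := ¬ D_get_T_matrix n sums N → out = get_T_matrix_alt n sums N
instance (n : List (List Int)) (sums : List Int) (N : Int) (out : List (List Int)) : Decidable (Spec_get_T_matrix n sums N out) := by unfold Spec_get_T_matrix; infer_instance

def pvDiffWitness_get_T_matrix : List (List Int) × List Int × Int := ([[1, 2, 9], [3, 4]], [3, 7], 2)
def pvDiffWitnessOut_get_T_matrix : (List (List Int)) × (List (List Int)) :=
  ([[7, 14, 9], [9, 12]], [[7, 14, 63], [9, 12]])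

-- ===== CLAIM (what is proved, stated in full; the proofs are below) =====
def Claim_unchanged_get_T_matrix : Prop := ∀ (n : List (List Int)) (sums : List Int) (N : Int), Dom_get_T_matrix n sums N → Pre_get_T_matrix n sums N → Spec_get_T_matrix n sums N (get_T_matrix n sums N)
def Claim_changed_get_T_matrix : Prop := Dom_get_T_matrix (pvDiffWitness_get_T_matrix.1) (pvDiffWitness_get_T_matrix.2.1) (pvDiffWitness_get_T_matrix.2.2) ∧ Pre_get_T_matrix (pvDiffWitness_get_T_matrix.1) (pvDiffWitness_get_T_matrix.2.1) (pvDiffWitness_get_T_matrix.2.2) ∧ D_get_T_matrix (pvDiffWitness_get_T_matrix.1) (pvDiffWitness_get_T_matrix.2.1) (pvDiffWitness_get_T_matrix.2.2) ∧ get_T_matrix (pvDiffWitness_get_T_matrix.1) (pvDiffWitness_get_T_matrix.2.1) (pvDiffWitness_get_T_matrix.2.2) = pvDiffWitnessOut_get_T_matrix.1 ∧ get_T_matrix_alt (pvDiffWitness_get_T_matrix.1) (pvDiffWitness_get_T_matrix.2.1) (pvDiffWitness_get_T_matrix.2.2) = pvDiffWitnessOut_get_T_matrix.2 ∧ pvDiffWitnessOut_get_T_matrix.1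 ≠ pvDiffWitnessOut_get_T_matrix.2

-- ===== LEMMAS AND PROOFS =====

-- a multiply-fold with any start value is start * product
lemma pv_foldl_mul (f : Int → Int) (l : List Int) (a : Int) :
    l.foldl (fun t j => t * f j) a = a * (l.map f).prod := by
  induction l generalizing a with
  | nil => simp
  | cons x l ih => simp [ih (a * f x), mul_assoc]

-- indices a..b-1 read through pyGetD are the segment (drop a).take (b-a)
lemma pv_map_pyGetD_range (l : List Int) (a b : Nat) (hb : b ≤ l.length) :
    (PySem.List.pyRange (a : Int) (b : Int)).map (fun j => PySem.List.pyGetD l j 0)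
      = (l.drop a).take (b - a) := by
  have hlen : ((l.take b).length : Int) = (b : Int) := by
    simp [List.length_take, Nat.min_eq_left hb]
  have h1 : (PySem.List.pyRange (a : Int) (b : Int)).map
      (fun j => PySem.List.pyGetD (l.take b) j 0) = (l.take b).drop a := by
    have := PySem.List.map_pyGetD_pyRange' (l.take b) 0 (a := (a : Int)) (by positivity)
    rw [hlen] at this
    simpa using this
  have h2 : (PySem.List.pyRange (a : Int) (b : Int)).map (fun j => PySem.List.pyGetD l j 0)
      = (PySem.List.pyRange (a : Int) (b : Int)).map (fun j => PySem.List.pyGetD (l.take b) j 0) := by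
    apply List.map_congr_left
    intro j hj
    rw [PySem.List.mem_pyRange_one] at hj
    have h0 : 0 ≤ j := le_trans (by positivity) hj.1
    rw [PySem.List.pyGetD_eq_getElem l 0 h0 (by omega),
        PySem.List.pyGetD_eq_getElem (l.take b) 0 h0 (by rw [hlen]; exact hj.2)]
    exact (List.getElem_take).symm
  rw [h2, h1, List.drop_take]

-- A's in-place scaling loop: first m entries scaled, tail untouched
lemma pv_setloop (cs : List Int) (t : Int) (m : Nat) (h : m ≤ cs.length) :
    (PySem.List.pyRange 0 (m : Int)).foldl
      (fun c j => PySem.List.pySetD c j (PySem.List.pyGetD c j 0 * t)) cs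
    = (cs.take m).map (fun x => x * t) ++ cs.drop m := by
  induction m with
  | zero => simp [PySem.List.pyRange_one_eq_nil]
  | succ m ih =>
    have hm : m < cs.length := by omega
    have hcast : ((m + 1 : Nat) : Int) = (m : Int) + 1 := by push_cast; ring
    rw [hcast, PySem.List.pyRange_one_succ_right (by positivity), List.foldl_append,
        ih (by omega)]
    have hA : ((cs.take m).map (fun x => x * t)).length = m := by
      simp [Nat.min_eq_left (le_of_lt hm)]
    rw [List.drop_eq_getElem_cons hm]
    simp only [List.foldl_cons, List.foldl_nil]
    rw [PySem.List.pyGetD_natCast, PySem.List.pySetD_natCast]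
    rw [List.getD_eq_getElem?_getD, List.getElem?_append_right (by omega), hA]
    simp only [Nat.sub_self, List.getElem?_cons_zero, Option.getD_some]
    rw [List.set_append, if_neg (by omega), hA]
    simp only [Nat.sub_self, List.set_cons_zero]
    rw [List.take_add_one, List.getElem?_eq_getElem hm]
    simp only [Option.toList_some, List.map_append, List.map_singleton, List.append_assoc,
      List.singleton_append]

-- B's append-of-running-product loop is the list of partial products
lemma pv_scanloop (l : List Int) (acc : List Int) (b : Int) :
    l.foldl (fun p s => p ++ [PySem.List.pyGetD p (-1) 1 * s]) (acc ++ [b])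
    = acc ++ (List.range (l.length + 1)).map (fun k => b * (l.take k).prod) := by
  induction l generalizing acc b with
  | nil => simp
  | cons x l ih =>
    have hr : (List.range ((x :: l).length + 1)).map (fun k => b * ((x :: l).take k).prod)
        = b :: (List.range (l.length + 1)).map (fun k => (b * x) * (l.take k).prod) := by
      rw [show (x :: l).length + 1 = (l.length + 1) + 1 from rfl, List.range_succ_eq_map]
      simp [List.map_map, Function.comp_def, mul_assoc]
    rw [hr]
    simp only [List.foldl_cons, PySem.List.pyGetD_neg_one_append_singleton]
    rw [show acc ++ [b] ++ [b * x] = (acc ++ [b]) ++ [b * x] from rfl, ih]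
    simp

-- the index-driven scan is the list of partial products of the read values
lemma pvScanIdx_eq (sums : List Int) (idxs : List Int) :
    pvScanIdx sums idxs
    = (List.range (idxs.length + 1)).map
        (fun k => ((idxs.map (fun j => PySem.List.pyGetD sums j 0)).take k).prod) := by
  unfold pvScanIdx
  have := pv_scanloop (idxs.map (fun j => PySem.List.pyGetD sums j 0)) [] 1
  simpa [List.foldl_map] using this

-- A's j ≠ i loop computes prefix-product(i) * suffix-product(i)
lemma pv_temp_eq (sums : List Int) (m i : Nat) (hi : i < m)
    (hs : 2 ≤ m → m ≤ sums.length) :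
    pvTempA sums (m : Int) (i : Int)
    = (sums.take i).prod * ((sums.drop (i + 1)).take (m - (i + 1))).prod := by
  have hib : i ≤ sums.length := by
    rcases Nat.lt_or_ge m 2 with h | h
    · omega
    · exact le_trans (le_of_lt hi) (hs h)
  unfold pvTempA
  rw [PySem.List.pyRange_one_append 0 (i : Int) (m : Int) (by positivity)
        (by exact_mod_cast le_of_lt hi),
      PySem.List.pyRange_one_append (i : Int) ((i : Int) + 1) (m : Int) (by omega)
        (by exact_mod_cast hi),
      List.foldl_append, List.foldl_append]
  rw [PySem.List.foldl_congr_mem _ _ (fun t j => t * PySem.List.pyGetD sums j 0) 1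
        (by
          intro acc j hj
          rw [PySem.List.mem_pyRange_one] at hj
          rw [if_pos (by omega)])]
  rw [pv_foldl_mul, one_mul]
  rw [PySem.List.pyRange_one_singleton]
  simp only [List.foldl_cons, List.foldl_nil, ne_eq, not_true_eq_false, if_false]
  rw [PySem.List.foldl_congr_mem _ _ (fun t j => t * PySem.List.pyGetD sums j 0) _
        (by
          intro acc j hj
          rw [PySem.List.mem_pyRange_one] at hj
          rw [if_pos (by omega)])]
  rw [pv_foldl_mul]
  congr 1
  · have := pv_map_pyGetD_range sums 0 i hib
    simp only [Nat.cast_zero] at this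
    rw [this]
    simp
  · rcases Nat.lt_or_ge (i + 1) m with hc | hc
    · have hb : m ≤ sums.length := hs (by omega)
      have hcast : ((i : Int) + 1) = (((i + 1 : Nat)) : Int) := by push_cast; ring
      rw [hcast, pv_map_pyGetD_range sums (i + 1) m hb]
    · have hm : m = i + 1 := by omega
      subst hm
      rw [PySem.List.pyRange_one_eq_nil (by omega)]
      simp

-- B's prefix table read at i is the product of sums[:i]
lemma pv_pref_getD (sums : List Int) (m i : Nat) (hi : i < m)
    (hs : 2 ≤ m → m ≤ sums.length) :
    PySem.List.pyGetD (pvPrefB sums (m : Int)) (i : Int) 0 = (sums.take i).prod := by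
  have hmb : m - 1 ≤ sums.length := by
    rcases Nat.lt_or_ge m 2 with h | h
    · omega
    · have := hs h; omega
  have h1 : (PySem.List.pyRange 0 ((m : Int) - 1)).map (fun j => PySem.List.pyGetD sums j 0)
      = sums.take (m - 1) := by
    have hcast : ((m : Int) - 1) = (((m - 1 : Nat)) : Int) := by omega
    have := pv_map_pyGetD_range sums 0 (m - 1) hmb
    simp only [Nat.cast_zero] at this
    rw [hcast, this]
    simp
  have hlr : (PySem.List.pyRange 0 ((m : Int) - 1)).length = m - 1 := by
    rw [PySem.List.length_pyRange_one]; omega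
  rw [pvPrefB, pvScanIdx_eq, h1, hlr]
  rw [PySem.List.pyGetD_natCast,
      PySem.List.getD_map_range _ _ _ _ (by omega)]
  rw [List.take_take, Nat.min_eq_left (by omega)]

-- B's suffix table read at i is the product of sums[i+1:N]
lemma pv_suff_getD (sums : List Int) (m i : Nat) (hi : i < m)
    (hs : 2 ≤ m → m ≤ sums.length) :
    PySem.List.pyGetD (pvSuffB sums (m : Int)) (i : Int) 0
    = ((sums.drop (i + 1)).take (m - (i + 1))).prod := by
  have hmb : m ≤ sums.length ∨ m < 2 := by
    rcases Nat.lt_or_ge m 2 with h | h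
    · right; exact h
    · left; exact hs h
  have h1 : (PySem.List.pyRange 1 (m : Int)).map (fun j => PySem.List.pyGetD sums j 0)
      = (sums.drop 1).take (m - 1) := by
    rcases hmb with h | h
    · have := pv_map_pyGetD_range sums 1 m h
      simpa using this
    · have hm : m = 1 := by omega
      subst hm
      rw [PySem.List.pyRange_one_eq_nil (by omega)]
      simp
  have hl : ((sums.drop 1).take (m - 1)).length = m - 1 := by
    rcases hmb with h | h
    · simp only [List.length_take, List.length_drop]; omega
    · have hm : m = 1 := by omega
      subst hm
      simp
  have hlr : ((PySem.List.pyRange 1 (m : Int)).reverse).length = m - 1 := by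
    rw [List.length_reverse, PySem.List.length_pyRange_one]; omega
  rw [pvSuffB, pvScanIdx_eq, List.map_reverse, h1, hlr, PySem.List.pyGetD_natCast]
  have hlen : ((List.range (m - 1 + 1)).map
      (fun k => (((sums.drop 1).take (m - 1)).reverse.take k).prod)).length = m := by
    simp
    omega
  rw [List.getD_eq_getElem?_getD, List.getElem?_reverse (by omega)]
  rw [hlen]
  rw [List.getElem?_eq_getElem (by rw [hlen]; omega)]
  simp only [List.getElem_map, List.getElem_range, Option.getD_some]
  rw [List.take_reverse, List.prod_reverse, hl]
  rw [show m - 1 - (m - 1 - i) = i from by omega, List.drop_take, List.drop_drop,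
      show 1 + i = i + 1 from by omega, show m - 1 - i = m - (i + 1) from by omega]

-- on an admitted input outside D_ every produced row agrees
lemma pv_row_eq (n : List (List Int)) (sums : List Int) (m i : Nat)
    (hiN : i < m) (hn : m ≤ n.length) (hs : 2 ≤ m → m ≤ sums.length)
    (hrow : ∀ row ∈ n.take m, (m : Int) ≤ (row.length : Int))
    (hnd : ∀ row ∈ n.take m, (row.length : Int) ≤ (m : Int) ∨ m = 1) :
    pvRowA n sums (m : Int) (i : Int)
    = (PySem.List.pyGetD n (i : Int) []).map
        (fun x => x * (PySem.List.pyGetD (pvPrefB sums (m : Int)) (i : Int) 0 *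
                       PySem.List.pyGetD (pvSuffB sums (m : Int)) (i : Int) 0)) := by
  have hin : i < n.length := by omega
  have hrowmem : n[i] ∈ n.take m := by
    rw [List.mem_take_iff_getElem]
    exact ⟨i, by omega, by simp⟩
  have hrl : m ≤ (n[i]'hin).length := by
    have := hrow _ hrowmem
    omega
  have hget : PySem.List.pyGetD n (i : Int) [] = n[i]'hin := by
    rw [PySem.List.pyGetD_natCast, List.getD_eq_getElem?_getD,
        List.getElem?_eq_getElem hin]
    rfl
  rw [pvRowA, hget, pv_setloop _ _ m hrl]
  rw [pv_temp_eq sums m i hiN hs, pv_pref_getD sums m i hiN hs,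
      pv_suff_getD sums m i hiN hs]
  rcases hnd _ hrowmem with hle | h1
  · have h2 : (n[i]'hin).take m = n[i]'hin := List.take_of_length_le (by omega)
    have h3 : (n[i]'hin).drop m = [] := List.drop_of_length_le (by omega)
    rw [h2, h3, List.append_nil]
  · subst h1
    have hi0 : i = 0 := by omega
    subst hi0
    simp
    rw [← List.drop_one, List.take_append_drop]

-- ===== VERDICT (by name: the statements are the Claim_ definitions above) =====
theorem get_T_matrix_spec : Claim_unchanged_get_T_matrix := by
  intro n sums N _ hpre
  unfold Spec_get_T_matrix
  intro hnd
  rcases le_or_gt N 0 with hN | hN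
  · rw [get_T_matrix, get_T_matrix_alt, PySem.List.pyRange_one_eq_nil hN]
    rfl
  · obtain ⟨hn, hs, hrow⟩ := hpre
    have hm : N = ((N.toNat : Nat) : Int) := by omega
    rw [get_T_matrix, get_T_matrix_alt]
    rw [PySem.List.foldl_append_singleton_eq_map]
    simp only [List.nil_append]
    apply List.map_congr_left
    intro i hi
    rw [PySem.List.mem_pyRange_one] at hi
    rw [show i = ((i.toNat : Nat) : Int) from by omega, hm]
    apply pv_row_eq
    · omega
    · omega
    · intro h2
      have := hs (by omega)
      omega
    · intro row hrmem
      have := hrow row hrmem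
      omega
    · intro row hrmem
      unfold D_get_T_matrix at hnd
      push_neg at hnd
      rcases Nat.lt_or_ge N.toNat 2 with h | h
      · right; omega
      · left
        have := hnd (by omega) row hrmem
        omega

theorem get_T_matrix_changed : Claim_changed_get_T_matrix := by
  unfold Claim_changed_get_T_matrix; decide
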